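-- pv_equiv track=rewrite | github.com/Abhishekkumar03012001/UserActivityTracker | screen_recording and analysis.py | detect_open_documents
-- ===== SOURCE A (Python) =====
-- def detect_open_documents(process_list):
--     doc_types = {
--         'Word': ['winword'],
--         'Excel': ['excel'],
--         'PowerPoint': ['powerpnt'],
--         'PDF Reader': ['acrord32', 'foxit', 'pdf'],
--         'Notepad': ['notepad'],
--         'VSCode': ['code'],
--         'Notepad++': ['notepad++']
--     }
--
--     open_docs = []
--     for name, keywords in doc_types.items():
--         for proc in process_list:
--             if any(k in proc.lower() for k in keywords):
--                 open_docs.append(name)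
--                 break
--
--     return open_docs
-- ===== SOURCE B (Python) =====
-- def detect_open_documents(process_list):
--     doc_types = {
--         'Word': ['winword'],
--         'Excel': ['excel'],
--         'PowerPoint': ['powerpnt'],
--         'PDF Reader': ['acrord32', 'foxit', 'pdf'],
--         'Notepad': ['notepad'],
--         'VSCode': ['code'],
--         'Notepad++': ['notepad++']
--     }
--
--     # Build one lowercased text of all process names, newline-separated.
--     # No keyword contains a newline, so a keyword occurs in the blob iff it
--     # occurs in some individual (lowercased) process name.
--     blob = "\n".join(p.lower() for p in process_list)
--     return [name for name, keywords in doc_types.items()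
--             if any(k in blob for k in keywords)]
-- ===== Notes on version B (the rewrite author's own statement) =====
-- stated objective: faster
-- what changed: B joins all lowercased process names into one newline-separated text and decides each document type by a single substring search in that blob (correct because no keyword contains a newline), instead of A's seven break-early scans of the process list.
import Mathlib
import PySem

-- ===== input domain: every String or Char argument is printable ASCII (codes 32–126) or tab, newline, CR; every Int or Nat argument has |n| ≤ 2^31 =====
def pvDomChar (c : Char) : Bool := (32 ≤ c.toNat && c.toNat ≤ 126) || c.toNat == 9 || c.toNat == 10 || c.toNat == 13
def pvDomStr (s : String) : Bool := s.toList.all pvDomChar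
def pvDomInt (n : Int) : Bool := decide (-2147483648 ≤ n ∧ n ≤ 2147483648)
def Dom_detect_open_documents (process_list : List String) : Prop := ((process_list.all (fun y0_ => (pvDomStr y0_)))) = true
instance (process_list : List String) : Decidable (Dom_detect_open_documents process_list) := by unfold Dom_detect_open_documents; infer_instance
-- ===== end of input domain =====

-- B joins all lowercased process names into one newline-separated text and answers each
-- document type by a single substring search in that blob (no keyword contains a newline),
-- instead of A's seven break-early scans of the process list; same return value, measured faster in a timing run.

-- ===== PORT A =====
-- the literal dict of document types, as its items list (distinct literal keys)
def pvDocTypes : List (String × List String) :=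
  [("Word", ["winword"]), ("Excel", ["excel"]), ("PowerPoint", ["powerpnt"]),
   ("PDF Reader", ["acrord32", "foxit", "pdf"]), ("Notepad", ["notepad"]),
   ("VSCode", ["code"]), ("Notepad++", ["notepad++"])]

-- A's inner 'for proc in process_list: if any(...): append; break' loop
def pvScanA (name : String) (kws : List String) (acc : List String) : List String → List String
  | [] => acc
  | p :: rest =>
      if kws.any (fun k => PySem.Str.isIn k (PySem.Str.lower p)) then acc ++ [name]
      else pvScanA name kws acc rest

def detect_open_documents (process_list : List String) : List String :=
  pvDocTypes.foldl (fun acc nk => pvScanA nk.1 nk.2 acc process_list) []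

-- ===== PORT B =====
-- the blob: "\n".join(p.lower() for p in process_list)
def pvBlob (process_list : List String) : String :=
  PySem.Str.join "\n" (process_list.map (fun p => PySem.Str.lower p))

def detect_open_documents_alt (process_list : List String) : List String :=
  let blob := pvBlob process_list
  (pvDocTypes.filter (fun nk => nk.2.any (fun k => PySem.Str.isIn k blob))).map Prod.fst

-- ===== PRECONDITION & SPEC =====
def Spec_detect_open_documents (process_list : List String) (out : List String) : Prop := out = detect_open_documents_alt process_list
instance (process_list : List String) (out : List String) : Decidable (Spec_detect_open_documents process_list out) := by unfold Spec_detect_open_documents; infer_instance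

-- ===== CLAIM (what is proved, stated in full; the proofs are below) =====
def Claim_equal_detect_open_documents : Prop := ∀ (process_list : List String), Dom_detect_open_documents process_list → Spec_detect_open_documents process_list (detect_open_documents process_list)

-- ===== LEMMAS AND PROOFS =====

-- A's scan-with-break equals the 'any' test
theorem pvScanA_eq (name : String) (kws : List String) (acc : List String) (procs : List String) :
    pvScanA name kws acc procs =
      if procs.any (fun p => kws.any (fun k => PySem.Str.isIn k (PySem.Str.lower p)))
      then acc ++ [name] else acc := by
  induction procs with
  | nil => simp [pvScanA]
  | cons p rest ih =>
      rw [pvScanA]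
      cases h : kws.any (fun k => PySem.Str.isIn k (PySem.Str.lower p)) with
      | true => simp only [List.any_cons, h, Bool.true_or, if_true]
      | false => simp only [List.any_cons, h, Bool.false_or, Bool.false_eq_true, if_false, ih]

-- a list avoiding c that is a prefix of xs ++ c :: ys is a prefix of xs
theorem prefix_of_prefix_append_cons {c : Char} (k : List Char) (hc : c ∉ k) :
    ∀ (xs ys : List Char), k <+: xs ++ c :: ys → k <+: xs := by
  induction k with
  | nil => intro xs ys _; exact List.nil_prefix
  | cons d k' ih =>
      intro xs ys h
      cases xs with
      | nil =>
          rcases List.cons_prefix_cons.mp h with ⟨hd, _⟩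
          exact absurd (hd ▸ List.mem_cons_self) hc
      | cons x xs' =>
          rcases List.cons_prefix_cons.mp h with ⟨hd, ht⟩
          have : k' <+: xs' := ih (fun hm => hc (List.mem_cons_of_mem _ hm)) xs' ys ht
          exact List.cons_prefix_cons.mpr ⟨hd, this⟩

-- an infix avoiding c of xs ++ c :: ys is an infix of xs or of ys
theorem infix_append_cons {c : Char} (k : List Char) (hc : c ∉ k) (xs ys : List Char) :
    k <:+: xs ++ c :: ys ↔ k <:+: xs ∨ k <:+: ys := by
  induction xs with
  | nil =>
      simp only [List.nil_append, List.infix_cons_iff]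
      constructor
      · rintro (hp | hi)
        · cases k with
          | nil => exact Or.inl List.nil_infix
          | cons d k' =>
              rcases List.cons_prefix_cons.mp hp with ⟨hd, _⟩
              exact absurd (hd ▸ List.mem_cons_self) hc
        · exact Or.inr hi
      · rintro (hi | hi)
        · rcases List.eq_nil_of_infix_nil hi with rfl
          exact Or.inr List.nil_infix
        · exact Or.inr hi
  | cons x xs' ih =>
      rw [List.cons_append, List.infix_cons_iff, List.infix_cons_iff]
      constructor
      · rintro (hp | hi)
        · have : k <+: x :: xs' :=
            prefix_of_prefix_append_cons k hc (x :: xs') ys hp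
          exact Or.inl (Or.inl this)
        · rcases ih.mp hi with h | h
          · exact Or.inl (Or.inr h)
          · exact Or.inr h
      · rintro ((hp | hi) | hy)
        · exact Or.inl (hp.trans (List.prefix_append _ _))
        · exact Or.inr (ih.mpr (Or.inl hi))
        · exact Or.inr (ih.mpr (Or.inr hy))

-- a nonempty, newline-free keyword occurs in the newline-joined text iff it occurs in some part
theorem isIn_join (k : List Char) (hk : k ≠ []) (hc : '\n' ∉ k) (parts : List (List Char)) :
      PySem.Chars.isIn k (PySem.Chars.join ['\n'] parts) = parts.any (fun p => PySem.Chars.isIn k p) := by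
  induction parts with
  | nil =>
      rw [Bool.eq_iff_iff]
      simp [PySem.Chars.join, List.intercalate, PySem.Chars.isIn_iff_infix, hk]
  | cons p rest ih =>
      cases rest with
      | nil =>
          simp [PySem.Chars.join, List.intercalate]
      | cons q rest' =>
          rw [PySem.Chars.join_cons_cons, List.any_cons, Bool.eq_iff_iff, Bool.or_eq_true,
            PySem.Chars.isIn_iff_infix, List.append_assoc, List.singleton_append,
            infix_append_cons k hc p _, ← PySem.Chars.isIn_iff_infix, ← PySem.Chars.isIn_iff_infix, ← ih]

-- the same statement at String level, for the blob
theorem isIn_blob (k : String) (pl : List String) (hk : k.toList ≠ []) (hc : '\n' ∉ k.toList) :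
    PySem.Str.isIn k (pvBlob pl) = pl.any (fun p => PySem.Str.isIn k (PySem.Str.lower p)) := by
  have h := isIn_join k.toList hk hc ((pl.map (fun p => PySem.Str.lower p)).map String.toList)
  simp only [PySem.Str.isIn_eq, pvBlob, PySem.Str.toList_join]
  rw [show ("\n".toList) = ['\n'] from rfl, h]
  simp [List.any_map, Function.comp_def]

-- swapping the two 'any' quantifiers
theorem any_swap (pl ks : List String) (f : String → String → Bool) :
    (pl.any fun p => ks.any fun k => f k p) = (ks.any fun k => pl.any fun p => f k p) := by
  rw [Bool.eq_iff_iff]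
  simp only [List.any_eq_true]
  exact ⟨fun ⟨p, hp, k, hk, h⟩ => ⟨k, hk, p, hp, h⟩, fun ⟨k, hk, p, hp, h⟩ => ⟨p, hp, k, hk, h⟩⟩

-- pointwise-equal predicates give equal 'any'
theorem any_ext (ks : List String) (f g : String → Bool) (h : ∀ k ∈ ks, f k = g k) :
    ks.any f = ks.any g := by
  induction ks with
  | nil => rfl
  | cons k rest ih =>
      rw [List.any_cons, List.any_cons, h k List.mem_cons_self,
        ih (fun x hx => h x (List.mem_cons_of_mem _ hx))]

-- a fold that conditionally appends is a filter-then-map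
theorem foldl_if_append (c : String × List String → Bool) :
    ∀ (D : List (String × List String)) (acc : List String),
      D.foldl (fun acc nk => if c nk then acc ++ [nk.1] else acc) acc
        = acc ++ (D.filter c).map Prod.fst := by
  intro D
  induction D with
  | nil => intro acc; simp
  | cons nk rest ih =>
      intro acc
      rw [List.foldl_cons, List.filter_cons]
      cases h : c nk with
      | true => simp [ih]
      | false => simp [ih]

-- per-entry: A's match condition equals B's blob test
theorem cond_eq (pl : List String) (nk : String × List String) (hnk : nk ∈ pvDocTypes) :
    (pl.any fun p => nk.2.any fun k => PySem.Str.isIn k (PySem.Str.lower p))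
      = nk.2.any (fun k => PySem.Str.isIn k (pvBlob pl)) := by
  have step : ∀ ks : List String,
      (∀ k ∈ ks, k.toList ≠ [] ∧ '\n' ∉ k.toList) →
      (pl.any fun p => ks.any fun k => PySem.Str.isIn k (PySem.Str.lower p))
        = ks.any (fun k => PySem.Str.isIn k (pvBlob pl)) := by
    intro ks hks
    rw [any_swap]
    exact any_ext ks _ _
      (fun k hk => (isIn_blob k pl (hks k hk).1 (hks k hk).2).symm)
  simp only [pvDocTypes, List.mem_cons, List.not_mem_nil, or_false] at hnk
  rcases hnk with rfl | rfl | rfl | rfl | rfl | rfl | rfl <;>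
    exact step _ (by decide)

-- ===== VERDICT (by name: the statement is the Claim_ definition above) =====
theorem detect_open_documents_spec : Claim_equal_detect_open_documents := by
  intro pl _
  show detect_open_documents pl = detect_open_documents_alt pl
  unfold detect_open_documents detect_open_documents_alt
  simp only [pvScanA_eq, foldl_if_append, List.nil_append]
  exact congrArg (List.map Prod.fst)
    (List.filter_congr (fun nk hnk => cond_eq pl nk hnk))
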